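-- pv_equiv track=rewrite | github.com/saket-m0/flames_calculator | flames_calculator.py | getuncommons
-- ===== SOURCE A (Python) =====
-- def getuncommons(name_1, name_2) :
--     for letter in name_1 :
--         for check in name_2 :
--             if letter == check :
--                 name_1 = name_1.replace(letter,"",1)
--                 name_2 = name_2.replace(check,"",1)
--                 break
--
--     flames_unit = name_1 + name_2
--     return flames_unit
-- ===== SOURCE B (Python) =====
-- def getuncommons(name_1, name_2):
--     c1 = {}
--     for ch in name_1:
--         c1[ch] = c1.get(ch, 0) + 1
--     c2 = {}
--     for ch in name_2:
--         c2[ch] = c2.get(ch, 0) + 1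
--     common = {ch: min(c1[ch], c2.get(ch, 0)) for ch in c1}
--
--     def strip(s, removals):
--         rem = dict(removals)
--         out = []
--         for ch in s:
--             if rem.get(ch, 0) > 0:
--                 rem[ch] = rem[ch] - 1
--             else:
--                 out.append(ch)
--         return "".join(out)
--
--     return strip(name_1, common) + strip(name_2, common)
-- ===== Notes on version B (the rewrite author's own statement) =====
-- stated objective: faster
-- what changed: Replaces the nested scan-and-replace loops (each replace rescans the strings) with one counting pass per string plus one filtering pass that drops the first min(count1,count2) occurrences of each character.
import Mathlib
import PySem

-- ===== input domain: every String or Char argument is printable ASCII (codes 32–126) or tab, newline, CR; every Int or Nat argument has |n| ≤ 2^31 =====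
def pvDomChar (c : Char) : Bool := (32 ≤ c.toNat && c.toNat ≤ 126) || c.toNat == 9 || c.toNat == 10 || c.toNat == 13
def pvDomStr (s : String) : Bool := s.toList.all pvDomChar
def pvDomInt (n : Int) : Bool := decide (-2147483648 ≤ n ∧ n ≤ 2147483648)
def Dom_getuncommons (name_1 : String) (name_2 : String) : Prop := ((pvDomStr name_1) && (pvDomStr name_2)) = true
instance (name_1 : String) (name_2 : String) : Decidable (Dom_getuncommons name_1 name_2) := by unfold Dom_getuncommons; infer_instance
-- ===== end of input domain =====

-- B replaces A's nested scan-and-replace loops by one counting pass per string plus one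
-- filtering pass dropping the first min(count1,count2) occurrences of each character (faster).

-- ===== PORT A =====
-- s.replace(c, "", 1) for a single character c: remove the first occurrence (exact).
def pvReplace1 : List Char → Char → List Char
  | [], _ => []
  | x :: xs, c => if x == c then xs else x :: pvReplace1 xs c

-- the inner 'for check in name_2: if letter == check: …; break' loop
def pvInner (letter : Char) : List Char → List Char → List Char → List Char × List Char
  | [], n1, n2 => (n1, n2)
  | check :: rest, n1, n2 =>
    if letter == check then (pvReplace1 n1 letter, pvReplace1 n2 check)
    else pvInner letter rest n1 n2

-- the outer loop: iterates over the ORIGINAL name_1 (Python evaluates the iterable once)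
def pvALoop : List Char → List Char → List Char → List Char × List Char
  | [], n1, n2 => (n1, n2)
  | letter :: rest, n1, n2 =>
    let st := pvInner letter n2 n1 n2
    pvALoop rest st.1 st.2

def getuncommons (name_1 : String) (name_2 : String) : String :=
  let st := pvALoop name_1.toList name_1.toList name_2.toList
  String.ofList (st.1 ++ st.2)

-- ===== PORT B =====
-- c[ch] = c.get(ch, 0) + 1 over the string
def pvCount (s : List Char) : PySem.Dict Char Int :=
  s.foldl (fun d ch => d.insert ch (d.getD ch 0 + 1)) PySem.Dict.empty

-- {ch: min(c1[ch], c2.get(ch, 0)) for ch in c1}; c1[ch] = getD since ch ∈ c1.keys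
def pvCommon (c1 c2 : PySem.Dict Char Int) : PySem.Dict Char Int :=
  c1.keys.foldl (fun d ch => d.insert ch (min (c1.getD ch 0) (c2.getD ch 0))) PySem.Dict.empty

-- the strip helper: one pass, decrement the budget or keep the character
def pvStrip (s : List Char) (removals : PySem.Dict Char Int) : List Char :=
  (s.foldl (fun (st : PySem.Dict Char Int × List Char) ch =>
      if st.1.getD ch 0 > 0 then (st.1.insert ch (st.1.getD ch 0 - 1), st.2)
      else (st.1, st.2 ++ [ch])) (removals, [])).2

def getuncommons_alt (name_1 : String) (name_2 : String) : String :=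
  let c1 := pvCount name_1.toList
  let c2 := pvCount name_2.toList
  let common := pvCommon c1 c2
  String.ofList (pvStrip name_1.toList common ++ pvStrip name_2.toList common)

-- ===== PRECONDITION & SPEC =====
def Spec_getuncommons (name_1 : String) (name_2 : String) (out : String) : Prop := out = getuncommons_alt name_1 name_2
instance (name_1 : String) (name_2 : String) (out : String) : Decidable (Spec_getuncommons name_1 name_2 out) := by unfold Spec_getuncommons; infer_instance

-- ===== CLAIM (what is proved, stated in full; the proofs are below) =====
def Claim_equal_getuncommons : Prop := ∀ (name_1 : String) (name_2 : String), Dom_getuncommons name_1 name_2 → Spec_getuncommons name_1 name_2 (getuncommons name_1 name_2)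

-- ===== LEMMAS AND PROOFS =====

theorem pvReplace1_eq_erase (s : List Char) (c : Char) : pvReplace1 s c = s.erase c := by
  induction s with
  | nil => rfl
  | cons x xs ih => simp [pvReplace1, List.erase_cons, ih]

theorem pvInner_eq (letter : Char) (cs n1 n2 : List Char) :
    pvInner letter cs n1 n2 =
      if letter ∈ cs then (n1.erase letter, n2.erase letter) else (n1, n2) := by
  induction cs with
  | nil => simp [pvInner]
  | cons check rest ih =>
    by_cases h : letter = check
    · subst h; simp [pvInner, pvReplace1_eq_erase]
    · simp [pvInner, h, ih]

-- the sub-multiset of l that A's loop matches against t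
def pvMatched : List Char → List Char → List Char
  | [], _ => []
  | c :: l, t => if c ∈ t then c :: pvMatched l (t.erase c) else pvMatched l t

theorem pvALoop_eq (l : List Char) : ∀ (n1 n2 : List Char),
    pvALoop l n1 n2 = ((pvMatched l n2).foldl List.erase n1, (pvMatched l n2).foldl List.erase n2) := by
  induction l with
  | nil => intro n1 n2; simp [pvALoop, pvMatched]
  | cons c l ih =>
    intro n1 n2
    by_cases h : c ∈ n2
    · simp [pvALoop, pvInner_eq, pvMatched, h, ih]
    · simp [pvALoop, pvInner_eq, pvMatched, h, ih]

theorem pvMatched_count (l : List Char) : ∀ (t : List Char) (c : Char),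
    (pvMatched l t).count c = min (l.count c) (t.count c) := by
  induction l with
  | nil => intro t c; simp [pvMatched]
  | cons x l ih =>
    intro t c
    by_cases hx : x ∈ t
    · by_cases hc : c = x
      · subst hc
        have h1 : 1 ≤ t.count c := List.one_le_count_iff.mpr hx
        simp [pvMatched, hx, ih, List.count_erase_self, List.count_cons_self]
        omega
      · have hxc : ¬ x = c := fun h => hc h.symm
        simp [pvMatched, hx, ih, List.count_erase_of_ne hc, hxc]
    · by_cases hc : c = x
      · subst hc
        have h0 : t.count c = 0 := List.count_eq_zero.mpr hx
        simp [pvMatched, hx, ih, h0, List.count_cons_self]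
      · have hxc : ¬ x = c := fun h => hc h.symm
        simp [pvMatched, hx, ih, hxc]

-- canonical one-pass filter: drop the first (m c) occurrences of each character c
def pvStripF : List Char → (Char → Int) → List Char
  | [], _ => []
  | c :: s, m =>
    if m c > 0 then pvStripF s (fun d => if d = c then m c - 1 else m d)
    else c :: pvStripF s m

theorem pvStripF_nonpos (s : List Char) : ∀ m : Char → Int, (∀ c, m c ≤ 0) → pvStripF s m = s := by
  induction s with
  | nil => intro m _; rfl
  | cons c s ih =>
    intro m hm
    have : ¬ m c > 0 := by have := hm c; omega
    simp [pvStripF, this, ih m hm]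

theorem pvStripF_erase (x : Char) (s : List Char) : ∀ m : Char → Int, 0 ≤ m x →
    pvStripF (s.erase x) m = pvStripF s (fun d => if d = x then m d + 1 else m d) := by
  induction s with
  | nil => intro m _; rfl
  | cons c s ih =>
    intro m hx
    by_cases hcx : c = x
    · subst hcx
      have h1 : (c :: s).erase c = s := by simp
      rw [h1]
      conv_rhs => rw [pvStripF]
      rw [if_pos (by simp; omega)]
      exact (congrArg (pvStripF s)
        (funext fun d => by by_cases hd : d = c <;> simp [hd])).symm
    · have h1 : (c :: s).erase x = c :: s.erase x :=
        List.erase_cons_tail (by simp [hcx])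
      rw [h1]
      by_cases hmc : m c > 0
      · conv_lhs => rw [pvStripF]
        conv_rhs => rw [pvStripF]
        rw [if_pos hmc, if_pos (by simp [hcx]; omega)]
        rw [ih _ (by simp [Ne.symm hcx]; omega)]
        congr 1
        funext d
        by_cases hdx : d = x <;> by_cases hdc : d = c <;> simp_all
      · conv_lhs => rw [pvStripF]
        conv_rhs => rw [pvStripF]
        rw [if_neg hmc, if_neg (by simp [hcx]; omega)]
        rw [ih _ hx]

theorem foldl_erase_eq_stripF (ms : List Char) : ∀ s : List Char,
    ms.foldl List.erase s = pvStripF s (fun c => (ms.count c : Int)) := by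
  induction ms with
  | nil =>
    intro s
    rw [List.foldl_nil, pvStripF_nonpos s _ (by simp)]
  | cons x ms ih =>
    intro s
    rw [List.foldl_cons, ih (s.erase x), pvStripF_erase x s _ (by positivity)]
    refine congrArg (pvStripF s) (funext fun c => ?_)
    simp only [List.count_cons]
    by_cases hc : x = c
    · subst hc; push_cast; simp
    · have h2 : ¬ c = x := fun h => hc h.symm
      simp [hc, h2]

theorem pvStrip_loop (s : List Char) : ∀ (rem : PySem.Dict Char Int) (out : List Char),
    (s.foldl (fun (st : PySem.Dict Char Int × List Char) ch =>
        if st.1.getD ch 0 > 0 then (st.1.insert ch (st.1.getD ch 0 - 1), st.2)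
        else (st.1, st.2 ++ [ch])) (rem, out)).2
      = out ++ pvStripF s (fun c => rem.getD c 0) := by
  induction s with
  | nil => intro rem out; simp [pvStripF]
  | cons ch s ih =>
    intro rem out
    by_cases h : rem.getD ch 0 > 0
    · rw [List.foldl_cons]
      simp only [h, if_true]
      rw [ih]
      conv_rhs => rw [pvStripF]
      rw [if_pos h]
      refine congrArg (fun f => out ++ pvStripF s f) (funext fun c => ?_)
      rw [PySem.Dict.getD_insert]
    · rw [List.foldl_cons]
      simp only [h, if_false]
      rw [ih]
      conv_rhs => rw [pvStripF]
      rw [if_neg h]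
      simp

theorem pvStrip_eq (s : List Char) (rem : PySem.Dict Char Int) :
    pvStrip s rem = pvStripF s (fun c => rem.getD c 0) := by
  unfold pvStrip
  rw [pvStrip_loop]
  simp

theorem foldl_insert_getD (f : Char → Int) (c : Char) (K : List Char) :
    ∀ d : PySem.Dict Char Int,
      ((K.foldl (fun d ch => d.insert ch (f ch)) d).getD c 0)
        = if c ∈ K then f c else d.getD c 0 := by
  induction K with
  | nil => intro d; simp
  | cons k K ih =>
    intro d
    rw [List.foldl_cons, ih]
    by_cases hK : c ∈ K
    · simp [hK]
    · by_cases hk : c = k <;> simp [hK, hk, PySem.Dict.getD_insert]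

theorem pvCount_getD (s : List Char) (c : Char) :
    (pvCount s).getD c 0 = (s.count c : Int) := by
  unfold pvCount
  rw [PySem.Dict.foldl_insert_getD_add_one_eq_counter, PySem.Dict.getD_counter]

theorem pvCommon_getD (s t : List Char) (c : Char) :
    (pvCommon (pvCount s) (pvCount t)).getD c 0
      = ((min (s.count c) (t.count c) : Nat) : Int) := by
  unfold pvCommon
  have hkeys : (pvCount s).keys = PySem.Set.ofList s := by
    unfold pvCount
    rw [PySem.Dict.foldl_insert_getD_add_one_eq_counter, PySem.Dict.keys_counter]
  have h := foldl_insert_getD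
    (fun ch => min ((pvCount s).getD ch 0) ((pvCount t).getD ch 0)) c
    ((pvCount s).keys) PySem.Dict.empty
  rw [h, hkeys]
  by_cases hc : c ∈ s
  · simp [PySem.Set.mem_ofList, hc, pvCount_getD, Nat.cast_min]
  · have h0 : s.count c = 0 := List.count_eq_zero.mpr hc
    simp [PySem.Set.mem_ofList, hc, h0]

-- ===== VERDICT (by name: the statement is the Claim_ definition above) =====
theorem getuncommons_spec : Claim_equal_getuncommons := by
  intro name_1 name_2 _
  show getuncommons name_1 name_2 = getuncommons_alt name_1 name_2
  simp only [getuncommons, getuncommons_alt]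
  have hms : ∀ c, ((pvMatched name_1.toList name_2.toList).count c : Int)
      = (pvCommon (pvCount name_1.toList) (pvCount name_2.toList)).getD c 0 := by
    intro c
    rw [pvCommon_getD, pvMatched_count]
  have hfun : (fun c => ((pvMatched name_1.toList name_2.toList).count c : Int))
      = fun c => (pvCommon (pvCount name_1.toList) (pvCount name_2.toList)).getD c 0 :=
    funext hms
  rw [pvALoop_eq, foldl_erase_eq_stripF, foldl_erase_eq_stripF, pvStrip_eq, pvStrip_eq, hfun]
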